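-- pv_equiv track=rewrite | github.com/ermmy-coder/Hete_MESE-python | Hete_MESE.py | seed_expansion
-- ===== SOURCE A (Python) =====
-- def get_neighbors(node, adj):
--     """通过邻接表快速查询邻居"""
--     return list(adj.get(node, set()))
--
-- def seed_expansion(hetero_graph, seed_communities, central_node_type,adjacency_list):
--     """
--     将种子社区扩展到其他节点类型
--     :param hetero_graph: 异构网络
--     :param seed_communities: 种子社区列表
--     :param central_node_type: 中心节点类型
--     :return: 异构社区列表 [{'authors': [], 'papers': [], ...}, ...]
--     """
--     final_communities = []
--     for seed in seed_communities:
--         community = {central_node_type: set(seed)}#为当前正在扩展的种子社区创建一个空容器，用于存储该社区内所有类型的节点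
--         # 初始化其他节点类型
--         for node_type in hetero_graph.keys():
--             if node_type != central_node_type:#跳过中心节点
--                 community[node_type] = set()#初始化其他类型节点的社区为空社区
--
--         # 扩展非中心节点（公式4）
--         for node_type, nodes in hetero_graph.items():#nodes是某个类型对应的所有节点集合
--             if node_type == central_node_type:#跳过中心节点
--                 continue
--             for node in nodes:#非中心节点的某种类型节点的每一个节点
--                 max_sim = -1
--                 best_seeds = []
--                 for seed_node in seed:#某个种子社区的每个节点
--                     # 计算相似度（简化版：直接统计共同邻居）
--                     neighbors = set(get_neighbors(seed_node,adjacency_list))  # 需实现get_neighbors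
--                     sim = len(neighbors & set(get_neighbors(node,adjacency_list)))
--                     if sim > max_sim:
--                         max_sim = sim
--                         best_seeds = [seed_node]
--                     elif sim == max_sim:
--                         best_seeds.append(seed_node) #找到和该节点相似值最大的种子节点并加入到best_seeds的队列中
--                 if max_sim > 0.8:
--                     community[node_type].add(node)#如果最大相似度大于0了，就将该节点归入到该类型节点的社区中
--
--         final_communities.append(community)
--     return final_communities
-- ===== SOURCE B (Python) =====
-- def seed_expansion(hetero_graph, seed_communities, central_node_type, adjacency_list):
--     """Same result as A: a non-central node joins a community iff it shares at
--     least one neighbor with some seed node.  Instead of A's per-node scan over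
--     every seed node, precompute the union of all seed-node neighborhoods once
--     per community and test each node's neighborhood against that union."""
--     final_communities = []
--     for seed in seed_communities:
--         seed_neighborhood = set()
--         for seed_node in seed:
--             seed_neighborhood.update(adjacency_list.get(seed_node, ()))
--         community = {central_node_type: set(seed)}
--         for node_type, nodes in hetero_graph.items():
--             if node_type != central_node_type:
--                 community[node_type] = {
--                     node for node in nodes
--                     if not seed_neighborhood.isdisjoint(adjacency_list.get(node, ()))
--                 }
--         final_communities.append(community)
--     return final_communities
-- ===== Notes on version B (the rewrite author's own statement) =====
-- stated objective: faster
-- what changed: A scans every seed node per candidate node computing set intersections (node joins iff max common-neighbor count exceeds 0.8, i.e. is >= 1); B precomputes the union of all seed-node neighborhoods once per community and admits a node iff its neighborhood is not disjoint from that union, eliminating the inner seed loop.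
import Mathlib
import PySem

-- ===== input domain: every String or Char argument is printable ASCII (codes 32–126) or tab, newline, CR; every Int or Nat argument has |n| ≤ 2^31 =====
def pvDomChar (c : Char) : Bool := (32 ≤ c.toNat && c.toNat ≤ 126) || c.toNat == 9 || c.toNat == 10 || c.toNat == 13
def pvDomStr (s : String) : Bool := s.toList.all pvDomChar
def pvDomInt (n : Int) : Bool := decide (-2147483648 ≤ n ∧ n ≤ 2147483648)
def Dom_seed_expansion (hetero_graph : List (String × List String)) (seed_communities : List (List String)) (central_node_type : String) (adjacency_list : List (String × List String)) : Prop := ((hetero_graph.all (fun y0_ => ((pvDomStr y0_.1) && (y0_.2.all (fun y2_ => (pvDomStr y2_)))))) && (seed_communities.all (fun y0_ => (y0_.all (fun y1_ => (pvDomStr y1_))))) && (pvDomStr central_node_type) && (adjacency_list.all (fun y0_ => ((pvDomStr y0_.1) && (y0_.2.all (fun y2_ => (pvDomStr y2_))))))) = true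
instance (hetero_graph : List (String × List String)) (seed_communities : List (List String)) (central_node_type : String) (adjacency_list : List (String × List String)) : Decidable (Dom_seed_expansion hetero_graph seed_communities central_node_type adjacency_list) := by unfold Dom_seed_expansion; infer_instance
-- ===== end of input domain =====

-- B replaces A's per-node scan over all seed nodes by one precomputed union of the
-- seed nodes' neighborhoods per community (same return value; objective: faster).

-- ===== PORT A =====

-- get_neighbors(node, adj) = list(adj.get(node, set()))
def pvGetNeighbors (node : String) (adj : PySem.Dict String (List String)) : List String :=
  adj.getD node []

-- the inner 'for seed_node in seed' loop: state (max_sim, best_seeds)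
def pvSeedScan (adj : PySem.Dict String (List String)) (seed : List String) (node : String) :
    Int × List String :=
  seed.foldl (fun st seed_node =>
    let neighbors : PySem.Set String := PySem.Set.ofList (pvGetNeighbors seed_node adj)
    let sim : Int := PySem.Set.len (PySem.Set.inter neighbors (PySem.Set.ofList (pvGetNeighbors node adj)))
    if sim > st.1 then (sim, [seed_node])
    else if sim = st.1 then (st.1, st.2 ++ [seed_node])
    else st) (-1, [])

def seed_expansion (hetero_graph : List (String × List String)) (seed_communities : List (List String)) (central_node_type : String) (adjacency_list : List (String × List String)) : List (List (String × List String)) :=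
  let hg := PySem.Dict.ofList hetero_graph
  let adj := PySem.Dict.ofList adjacency_list
  seed_communities.foldl (fun final_communities seed =>
    let community : PySem.Dict String (List String) :=
      PySem.Dict.empty.insert central_node_type (PySem.Set.ofList seed)
    let community := hg.keys.foldl (fun c node_type =>
      if node_type ≠ central_node_type then c.insert node_type PySem.Set.empty else c) community
    let community := hg.items.foldl (fun c nt_nodes =>
      if nt_nodes.1 = central_node_type then c
      else nt_nodes.2.foldl (fun c node =>
        -- 'if max_sim > 0.8' with an integer max_sim is exactly 'max_sim > 0';
        -- community[node_type].add(node) = in-place update at an always-present key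
        if (pvSeedScan adj seed node).1 > 0 then
          c.modify nt_nodes.1 PySem.Set.empty (fun s => PySem.Set.add s node)
        else c) c) community
    final_communities ++ [community.items]) []

-- ===== PORT B =====

def seed_expansion_alt (hetero_graph : List (String × List String)) (seed_communities : List (List String)) (central_node_type : String) (adjacency_list : List (String × List String)) : List (List (String × List String)) :=
  let hg := PySem.Dict.ofList hetero_graph
  let adj := PySem.Dict.ofList adjacency_list
  seed_communities.foldl (fun final_communities seed =>
    let seed_neighborhood : PySem.Set String :=
      seed.foldl (fun u seed_node => PySem.Set.update u (adj.getD seed_node [])) PySem.Set.empty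
    let community : PySem.Dict String (List String) :=
      PySem.Dict.empty.insert central_node_type (PySem.Set.ofList seed)
    let community := hg.items.foldl (fun c nt_nodes =>
      if nt_nodes.1 ≠ central_node_type then
        c.insert nt_nodes.1 (PySem.Set.ofList (nt_nodes.2.filter
          (fun node => !(PySem.Set.isdisjoint seed_neighborhood (adj.getD node [])))))
      else c) community
    final_communities ++ [community.items]) []

-- ===== PRECONDITION & SPEC =====
def Spec_seed_expansion (hetero_graph : List (String × List String)) (seed_communities : List (List String)) (central_node_type : String) (adjacency_list : List (String × List String)) (out : List (List (String × List String))) : Prop := out = seed_expansion_alt hetero_graph seed_communities central_node_type adjacency_list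
instance (hetero_graph : List (String × List String)) (seed_communities : List (List String)) (central_node_type : String) (adjacency_list : List (String × List String)) (out : List (List (String × List String))) : Decidable (Spec_seed_expansion hetero_graph seed_communities central_node_type adjacency_list out) := by unfold Spec_seed_expansion; infer_instance

-- ===== CLAIM (what is proved, stated in full; the proofs are below) =====
def Claim_equal_seed_expansion : Prop := ∀ (hetero_graph : List (String × List String)) (seed_communities : List (List String)) (central_node_type : String) (adjacency_list : List (String × List String)), Dom_seed_expansion hetero_graph seed_communities central_node_type adjacency_list → Spec_seed_expansion hetero_graph seed_communities central_node_type adjacency_list (seed_expansion hetero_graph seed_communities central_node_type adjacency_list)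

-- ===== LEMMAS AND PROOFS =====

-- ---- semantic core: A's 'max common-neighbor count > 0' ↔ B's 'not disjoint from the union' ----

theorem pvScan_fst (f : String → Int) (seed : List String) : ∀ (m : Int) (bs : List String),
    (seed.foldl (fun st sn =>
      if f sn > st.1 then (f sn, [sn])
      else if f sn = st.1 then (st.1, st.2 ++ [sn]) else st) (m, bs)).1
    = seed.foldl (fun m sn => max m (f sn)) m := by
  induction seed with
  | nil => intro m bs; rfl
  | cons a l ih =>
    intro m bs
    simp only [List.foldl_cons]
    by_cases h1 : f a > m
    · rw [if_pos h1]; rw [ih]; congr 1; omega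
    · rw [if_neg h1]
      by_cases h2 : f a = m
      · rw [if_pos h2]; rw [ih]; congr 1; omega
      · rw [if_neg h2]; rw [ih]; congr 1; omega

theorem pvFoldMax_pos (f : String → Int) (seed : List String) : ∀ (m : Int),
    (0 < seed.foldl (fun m sn => max m (f sn)) m) ↔ (0 < m ∨ ∃ s ∈ seed, 0 < f s) := by
  induction seed with
  | nil => intro m; simp
  | cons a l ih =>
    intro m
    simp only [List.foldl_cons, ih, lt_max_iff, List.mem_cons]
    constructor
    · rintro (( h | h) | ⟨s, hs, h⟩)
      · exact Or.inl h
      · exact Or.inr ⟨a, Or.inl rfl, h⟩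
      · exact Or.inr ⟨s, Or.inr hs, h⟩
    · rintro (h | ⟨s, (rfl | hs), h⟩)
      · exact Or.inl (Or.inl h)
      · exact Or.inl (Or.inr h)
      · exact Or.inr ⟨s, hs, h⟩

theorem pvLen_pos (t : List String) : (0 < PySem.Set.len t) ↔ ∃ x, x ∈ t := by
  simp [PySem.Set.len, List.length_pos_iff_exists_mem]

theorem pvMem_nbhd (adj : PySem.Dict String (List String)) (seed : List String) (x : String) :
    ∀ (u : PySem.Set String),
    (x ∈ seed.foldl (fun u sn => PySem.Set.update u (adj.getD sn [])) u) ↔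
      (x ∈ u ∨ ∃ sn ∈ seed, x ∈ adj.getD sn []) := by
  induction seed with
  | nil => intro u; simp
  | cons a l ih =>
    intro u
    simp only [List.foldl_cons, ih, PySem.Set.mem_update, List.mem_cons]
    constructor
    · rintro ((h | h) | ⟨sn, hs, h⟩)
      · exact Or.inl h
      · exact Or.inr ⟨a, Or.inl rfl, h⟩
      · exact Or.inr ⟨sn, Or.inr hs, h⟩
    · rintro (h | ⟨sn, (rfl | hs), h⟩)
      · exact Or.inl (Or.inl h)
      · exact Or.inl (Or.inr h)
      · exact Or.inr ⟨sn, hs, h⟩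

/-- The two membership criteria coincide. -/
theorem pvCond_eq (adj : PySem.Dict String (List String)) (seed : List String) (node : String) :
    (0 < (pvSeedScan adj seed node).1) ↔
    (!((seed.foldl (fun u sn => PySem.Set.update u (adj.getD sn [])) PySem.Set.empty).isdisjoint
        (adj.getD node []))) = true := by
  rw [show (pvSeedScan adj seed node).1
      = seed.foldl (fun m sn => max m
          (PySem.Set.len ((PySem.Set.ofList (pvGetNeighbors sn adj)).inter
            (PySem.Set.ofList (pvGetNeighbors node adj))))) (-1) from
    pvScan_fst _ seed (-1) []]
  rw [pvFoldMax_pos]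
  have hdis : (!((seed.foldl (fun u sn => PySem.Set.update u (adj.getD sn [])) PySem.Set.empty).isdisjoint
      (adj.getD node []))) = true ↔
      ∃ x ∈ (seed.foldl (fun u sn => PySem.Set.update u (adj.getD sn [])) PySem.Set.empty),
        x ∈ adj.getD node [] := by
    rw [Bool.not_eq_true', ← Bool.not_eq_true, PySem.Set.isdisjoint_iff]
    push Not
    simp
  rw [hdis]
  constructor
  · rintro (h | ⟨s, hs, h⟩)
    · omega
    · rw [pvLen_pos] at h
      obtain ⟨x, hx⟩ := h
      rw [PySem.Set.mem_inter] at hx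
      refine ⟨x, ?_, ?_⟩
      · rw [pvMem_nbhd]
        exact Or.inr ⟨s, hs, (PySem.Set.mem_ofList _ _).1 hx.1⟩
      · exact (PySem.Set.mem_ofList _ _).1 hx.2
  · rintro ⟨x, hx1, hx2⟩
    rw [pvMem_nbhd] at hx1
    rcases hx1 with h | ⟨sn, hsn, h⟩
    · simp [PySem.Set.empty] at h
    · refine Or.inr ⟨sn, hsn, ?_⟩
      rw [pvLen_pos]
      exact ⟨x, (PySem.Set.mem_inter _ _ _).2
        ⟨(PySem.Set.mem_ofList _ _).2 h, (PySem.Set.mem_ofList _ _).2 hx2⟩⟩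

-- ---- dictionary plumbing ----

theorem pvKeys_insert_add {ν : Type} (d : PySem.Dict String ν) (k : String) (v : ν) :
    (d.insert k v).keys = PySem.Set.add d.keys k := by
  by_cases h : d.contains k = true
  · rw [PySem.Dict.keys_insert_of_contains d v h, PySem.Set.add,
      if_pos (by simpa using (PySem.Dict.contains_iff_mem_keys d k).1 h)]
  · rw [PySem.Dict.keys_insert_of_not_contains d v (by simpa using h), PySem.Set.add,
      if_neg (by simp; intro hk; exact absurd ((PySem.Dict.contains_iff_mem_keys d k).2 hk) h)]

-- inner 'for node in nodes' loop of A: effect on getD / keys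
theorem pvInnerA_getD_self (condA : String → Prop) [DecidablePred condA]
    (nt : String) (nodes : List String) : ∀ (c : PySem.Dict String (List String)),
    ((nodes.foldl (fun c node => if condA node then
        c.modify nt PySem.Set.empty (fun s => PySem.Set.add s node) else c) c).getD nt PySem.Set.empty)
    = nodes.foldl (fun s node => if condA node then PySem.Set.add s node else s)
        (c.getD nt PySem.Set.empty) := by
  induction nodes with
  | nil => intro c; rfl
  | cons a l ih =>
    intro c
    simp only [List.foldl_cons]
    by_cases h : condA a
    · rw [if_pos h, if_pos h, ih, PySem.Dict.getD_modify_self]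
    · rw [if_neg h, if_neg h, ih]

theorem pvInnerA_getD_ne (condA : String → Prop) [DecidablePred condA]
    (nt k : String) (hk : k ≠ nt) (nodes : List String) :
    ∀ (c : PySem.Dict String (List String)),
    ((nodes.foldl (fun c node => if condA node then
        c.modify nt PySem.Set.empty (fun s => PySem.Set.add s node) else c) c).getD k PySem.Set.empty)
    = c.getD k PySem.Set.empty := by
  induction nodes with
  | nil => intro c; rfl
  | cons a l ih =>
    intro c
    simp only [List.foldl_cons]
    by_cases h : condA a
    · rw [if_pos h, ih, PySem.Dict.getD_modify_of_ne _ _ _ hk]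
    · rw [if_neg h, ih]

theorem pvInnerA_keys (condA : String → Prop) [DecidablePred condA]
    (nt : String) (nodes : List String) : ∀ (c : PySem.Dict String (List String)),
    nt ∈ c.keys →
    ((nodes.foldl (fun c node => if condA node then
        c.modify nt PySem.Set.empty (fun s => PySem.Set.add s node) else c) c).keys) = c.keys := by
  induction nodes with
  | nil => intro c _; rfl
  | cons a l ih =>
    intro c hc
    simp only [List.foldl_cons]
    have hkeys : (c.modify nt PySem.Set.empty (fun s => PySem.Set.add s a)).keys = c.keys := by
      rw [PySem.Dict.keys_modify, PySem.Dict.keys_insert_of_contains _ _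
        ((PySem.Dict.contains_iff_mem_keys c nt).2 hc)]
    by_cases h : condA a
    · rw [if_pos h, ih _ (by rw [hkeys]; exact hc), hkeys]
    · rw [if_neg h, ih _ hc]

-- phase 2 of A ('initialize the other node types')
theorem pvPhase2_keys (cnt : String) (ks : List String) :
    ∀ (c : PySem.Dict String (List String)),
    ((ks.foldl (fun c nt => if nt ≠ cnt then c.insert nt PySem.Set.empty else c) c).keys)
    = PySem.Set.update c.keys (ks.filter (fun nt => nt ≠ cnt)) := by
  induction ks with
  | nil => intro c; rfl
  | cons a l ih =>
    intro c
    simp only [List.foldl_cons, List.filter_cons]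
    by_cases h : a ≠ cnt
    · rw [if_pos h, if_pos (by simpa using h), ih, pvKeys_insert_add]
      simp only [PySem.Set.update, List.foldl_cons]
    · rw [if_neg h, if_neg (by simpa using h), ih]

theorem pvPhase2_getD_ne (cnt : String) (ks : List String) (k : String)
    (h : ∀ nt ∈ ks, nt ≠ cnt → nt ≠ k) : ∀ (c : PySem.Dict String (List String)),
    ((ks.foldl (fun c nt => if nt ≠ cnt then c.insert nt PySem.Set.empty else c) c).getD
        k PySem.Set.empty)
    = c.getD k PySem.Set.empty := by
  induction ks with
  | nil => intro c; rfl
  | cons a l ih =>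
    intro c
    simp only [List.foldl_cons]
    by_cases ha : a ≠ cnt
    · rw [if_pos ha, ih (fun nt hnt => h nt (List.mem_cons_of_mem a hnt)),
        PySem.Dict.getD_insert_of_ne _ _ _ (Ne.symm (h a (List.mem_cons_self) ha))]
    · rw [if_neg ha, ih (fun nt hnt => h nt (List.mem_cons_of_mem a hnt))]

theorem pvPhase2_getD_mem (cnt : String) (ks : List String) (k : String)
    (hk : k ∈ ks) (hkc : k ≠ cnt) : ∀ (c : PySem.Dict String (List String)),
    ((ks.foldl (fun c nt => if nt ≠ cnt then c.insert nt PySem.Set.empty else c) c).getD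
        k PySem.Set.empty)
    = PySem.Set.empty := by
  induction ks with
  | nil => exact absurd hk (by simp)
  | cons a l ih =>
    intro c
    simp only [List.foldl_cons]
    by_cases hmem : k ∈ l
    · by_cases ha : a ≠ cnt
      · rw [if_pos ha]; exact ih hmem _
      · rw [if_neg ha]; exact ih hmem _
    · have hak : a = k := by
        rcases List.mem_cons.1 hk with h | h
        · exact h.symm
        · exact absurd h hmem
      subst hak
      rw [if_pos hkc, pvPhase2_getD_ne cnt l a (fun nt hnt _ => by
          rintro rfl; exact hmem hnt), PySem.Dict.getD_insert_self]

-- B's single pass: keys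
theorem pvPhaseB_keys (cnt : String) (V : String × List String → List String)
    (its : List (String × List String)) : ∀ (c : PySem.Dict String (List String)),
    ((its.foldl (fun c p => if p.1 ≠ cnt then c.insert p.1 (V p) else c) c).keys)
    = PySem.Set.update c.keys ((its.filter (fun p => p.1 ≠ cnt)).map Prod.fst) := by
  induction its with
  | nil => intro c; rfl
  | cons a l ih =>
    intro c
    simp only [List.foldl_cons, List.filter_cons]
    by_cases h : a.1 ≠ cnt
    · rw [if_pos h, if_pos (by simpa using h), List.map_cons, ih, pvKeys_insert_add]
      simp only [PySem.Set.update, List.foldl_cons]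
    · rw [if_neg h, if_neg (by simpa using h), ih]

theorem pvMap_fst_filter (cnt : String) (its : List (String × List String)) :
    (its.filter (fun p => p.1 ≠ cnt)).map Prod.fst
    = (its.map Prod.fst).filter (fun nt => nt ≠ cnt) := by
  induction its with
  | nil => rfl
  | cons a l ih =>
    simp only [List.filter_cons, List.map_cons]
    by_cases h : a.1 ≠ cnt
    · rw [if_pos (by simpa using h), if_pos (by simpa using h), List.map_cons, ih]
    · rw [if_neg (by simpa using h), if_neg (by simpa using h), ih]

-- conditional add-fold = add-fold over the filtered list
theorem pvFold_add_filter (condA : String → Prop) [DecidablePred condA] (condB : String → Bool)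
    (hc : ∀ n, condA n ↔ condB n = true) (nodes : List String) :
    ∀ (s : PySem.Set String),
    nodes.foldl (fun s node => if condA node then PySem.Set.add s node else s) s
    = (nodes.filter condB).foldl PySem.Set.add s := by
  induction nodes with
  | nil => intro s; rfl
  | cons a l ih =>
    intro s
    simp only [List.foldl_cons, List.filter_cons]
    by_cases h : condA a
    · rw [if_pos h, if_pos ((hc a).1 h), List.foldl_cons, ih]
    · rw [if_neg h, if_neg (by simpa using (fun hb => h ((hc a).2 hb))), ih]

-- master lemma: getD of A's expansion pass = getD of B's building pass
theorem pvMain_getD (condA : String → Prop) [DecidablePred condA] (condB : String → Bool)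
    (hc : ∀ n, condA n ↔ condB n = true) (cnt : String)
    (its : List (String × List String)) :
    ∀ (cA cB : PySem.Dict String (List String)),
    (its.map Prod.fst).Nodup →
    (∀ p ∈ its, p.1 ≠ cnt → cA.getD p.1 PySem.Set.empty = PySem.Set.empty) →
    (∀ k : String, (k ≠ cnt ∧ k ∈ its.map Prod.fst) ∨
        cA.getD k PySem.Set.empty = cB.getD k PySem.Set.empty) →
    ∀ k : String,
    ((its.foldl (fun c p => if p.1 = cnt then c
        else p.2.foldl (fun c node => if condA node then
          c.modify p.1 PySem.Set.empty (fun s => PySem.Set.add s node) else c) c) cA).getD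
        k PySem.Set.empty)
    = ((its.foldl (fun c p => if p.1 ≠ cnt then
          c.insert p.1 (PySem.Set.ofList (p.2.filter condB)) else c) cB).getD
        k PySem.Set.empty) := by
  induction its with
  | nil =>
    intro cA cB _ _ hH k
    rcases hH k with ⟨_, hmem⟩ | h
    · simp at hmem
    · simpa using h
  | cons p its ih =>
    intro cA cB hnd h0 hH k
    rw [List.map_cons] at hnd
    have hnd' : (its.map Prod.fst).Nodup := (List.nodup_cons.1 hnd).2
    have hp1 : p.1 ∉ its.map Prod.fst := (List.nodup_cons.1 hnd).1
    simp only [List.foldl_cons]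
    by_cases hpc : p.1 = cnt
    · rw [if_pos hpc, if_neg (by simpa using hpc)]
      refine ih cA cB hnd' (fun q hq => h0 q (List.mem_cons_of_mem p hq)) ?_ k
      intro k'
      rcases hH k' with ⟨h1, h2⟩ | h
      · rw [List.map_cons] at h2
        rcases List.mem_cons.1 h2 with h2 | h2
        · exact absurd (h2 ▸ hpc) h1
        · exact Or.inl ⟨h1, h2⟩
      · exact Or.inr h
    · rw [if_neg hpc, if_pos (by simpa using hpc)]
      refine ih _ _ hnd' ?_ ?_ k
      · intro q hq hqc
        have hqp : q.1 ≠ p.1 := by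
          rintro he
          exact hp1 (he ▸ (List.mem_map.2 ⟨q, hq, rfl⟩))
        rw [pvInnerA_getD_ne condA p.1 q.1 hqp]
        exact h0 q (List.mem_cons_of_mem p hq) hqc
      · intro k'
        by_cases hmem : k' ≠ cnt ∧ k' ∈ its.map Prod.fst
        · exact Or.inl hmem
        · refine Or.inr ?_
          by_cases hkp : k' = p.1
          · subst hkp
            rw [pvInnerA_getD_self, PySem.Dict.getD_insert_self,
              h0 p (List.mem_cons_self) hpc,
              pvFold_add_filter condA condB hc, PySem.Set.ofList_eq_foldl]
            rfl
          · rw [pvInnerA_getD_ne condA p.1 k' hkp,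
              PySem.Dict.getD_insert_of_ne _ _ _ hkp]
            rcases hH k' with ⟨h1, h2⟩ | h
            · rw [List.map_cons] at h2
              rcases List.mem_cons.1 h2 with h2 | h2
              · exact absurd h2 hkp
              · exact absurd ⟨h1, h2⟩ hmem
            · exact h

-- keys of A's expansion pass are unchanged
theorem pvPhase3_keys (condA : String → Prop) [DecidablePred condA] (cnt : String)
    (its : List (String × List String)) :
    ∀ (c : PySem.Dict String (List String)),
    (∀ p ∈ its, p.1 ≠ cnt → p.1 ∈ c.keys) →
    ((its.foldl (fun c p => if p.1 = cnt then c
        else p.2.foldl (fun c node => if condA node then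
          c.modify p.1 PySem.Set.empty (fun s => PySem.Set.add s node) else c) c) c).keys) = c.keys := by
  induction its with
  | nil => intro c _; rfl
  | cons p its ih =>
    intro c hc
    simp only [List.foldl_cons]
    by_cases hpc : p.1 = cnt
    · rw [if_pos hpc, ih c (fun q hq => hc q (List.mem_cons_of_mem p hq))]
    · rw [if_neg hpc]
      have hkeys := pvInnerA_keys condA p.1 p.2 c (hc p (List.mem_cons_self) hpc)
      rw [ih _ (fun q hq hqc => by rw [hkeys]; exact hc q (List.mem_cons_of_mem p hq) hqc),
        hkeys]

-- the per-seed communities coincide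
theorem pvCommunity_eq (cnt : String) (hg adjl : List (String × List String))
    (seed : List String) :
    (let hgd := PySem.Dict.ofList hg
     let adj := PySem.Dict.ofList adjl
     let community : PySem.Dict String (List String) :=
       PySem.Dict.empty.insert cnt (PySem.Set.ofList seed)
     let community := hgd.keys.foldl (fun c node_type =>
       if node_type ≠ cnt then c.insert node_type PySem.Set.empty else c) community
     let community := hgd.items.foldl (fun c nt_nodes =>
       if nt_nodes.1 = cnt then c
       else nt_nodes.2.foldl (fun c node =>
         if (pvSeedScan adj seed node).1 > 0 then
           c.modify nt_nodes.1 PySem.Set.empty (fun s => PySem.Set.add s node)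
         else c) c) community
     community.items)
    = (let hgd := PySem.Dict.ofList hg
       let adj := PySem.Dict.ofList adjl
       let seed_neighborhood : PySem.Set String :=
         seed.foldl (fun u seed_node => PySem.Set.update u (adj.getD seed_node [])) PySem.Set.empty
       let community : PySem.Dict String (List String) :=
         PySem.Dict.empty.insert cnt (PySem.Set.ofList seed)
       let community := hgd.items.foldl (fun c nt_nodes =>
         if nt_nodes.1 ≠ cnt then
           c.insert nt_nodes.1 (PySem.Set.ofList (nt_nodes.2.filter
             (fun node => !(PySem.Set.isdisjoint seed_neighborhood (adj.getD node [])))))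
         else c) community
       community.items) := by
  set hgd := PySem.Dict.ofList hg with hhgd
  set adj := PySem.Dict.ofList adjl with hadj
  set condA : String → Prop := fun node => (pvSeedScan adj seed node).1 > 0 with hcondA
  set condB : String → Bool := fun node =>
    !((seed.foldl (fun u seed_node => PySem.Set.update u (adj.getD seed_node [])) PySem.Set.empty).isdisjoint
      (adj.getD node [])) with hcondB
  have hc : ∀ n, condA n ↔ condB n = true := fun n => pvCond_eq adj seed n
  set d0 : PySem.Dict String (List String) :=
    PySem.Dict.empty.insert cnt (PySem.Set.ofList seed) with hd0
  set dA2 := hgd.keys.foldl (fun c node_type =>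
    if node_type ≠ cnt then c.insert node_type PySem.Set.empty else c) d0 with hdA2
  set dA := hgd.items.foldl (fun c nt_nodes =>
    if nt_nodes.1 = cnt then c
    else nt_nodes.2.foldl (fun c node =>
      if condA node then c.modify nt_nodes.1 PySem.Set.empty (fun s => PySem.Set.add s node)
      else c) c) dA2 with hdA
  set dB := hgd.items.foldl (fun c nt_nodes =>
    if nt_nodes.1 ≠ cnt then
      c.insert nt_nodes.1 (PySem.Set.ofList (nt_nodes.2.filter condB))
    else c) d0 with hdB
  show dA.items = dB.items
  -- keys of the starting dict
  have hd0keys : d0.keys = [cnt] := by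
    rw [hd0, PySem.Dict.keys_insert_of_not_contains _ _ (by rfl)]
    rfl
  have hkeys_eq_map : hgd.keys = hgd.items.map Prod.fst := rfl
  -- keys after A's phase 2
  have hdA2keys : dA2.keys = PySem.Set.update [cnt] (hgd.keys.filter (fun nt => nt ≠ cnt)) := by
    rw [hdA2, pvPhase2_keys, hd0keys]
  -- keys after A's phase 3
  have hdAkeys : dA.keys = dA2.keys := by
    rw [hdA]
    refine pvPhase3_keys condA cnt hgd.items dA2 ?_
    intro p hp hpc
    rw [hdA2keys, PySem.Set.mem_update]
    refine Or.inr (List.mem_filter.2 ⟨?_, by simpa using hpc⟩)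
    rw [hkeys_eq_map]
    exact List.mem_map.2 ⟨p, hp, rfl⟩
  -- keys of B
  have hdBkeys : dB.keys = dA2.keys := by
    rw [hdB, pvPhaseB_keys, hd0keys, pvMap_fst_filter, hdA2keys, hkeys_eq_map]
  -- the keys are nodup
  have hnodup : dA2.keys.Nodup := by
    rw [hdA2keys]
    exact PySem.Set.nodup_update _ _ (by simp)
  -- nodup of the item keys of hgd
  have hndk : (hgd.items.map Prod.fst).Nodup := by
    rw [← hkeys_eq_map, hhgd]
    exact PySem.Dict.nodup_keys_ofList hg
  -- getD agreement everywhere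
  have hgetD : ∀ k, dA.getD k PySem.Set.empty = dB.getD k PySem.Set.empty := by
    rw [hdA, hdB]
    refine pvMain_getD condA condB hc cnt hgd.items dA2 d0 hndk ?_ ?_
    · intro p hp hpc
      rw [hdA2]
      refine pvPhase2_getD_mem cnt hgd.keys p.1 ?_ hpc d0
      rw [hkeys_eq_map]
      exact List.mem_map.2 ⟨p, hp, rfl⟩
    · intro k
      by_cases hk : k ≠ cnt ∧ k ∈ hgd.items.map Prod.fst
      · exact Or.inl hk
      · refine Or.inr ?_
        rw [hdA2]
        refine pvPhase2_getD_ne cnt hgd.keys k ?_ d0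
        intro nt hnt hntc
        rintro rfl
        exact hk ⟨hntc, by rwa [← hkeys_eq_map]⟩
  -- items from keys and getD
  rw [PySem.Dict.items_eq_map_keys dA (by rw [hdAkeys]; exact hnodup) PySem.Set.empty,
    PySem.Dict.items_eq_map_keys dB (by rw [hdBkeys]; exact hnodup) PySem.Set.empty,
    hdAkeys, hdBkeys]
  exact List.map_congr_left (fun k _ => by rw [hgetD k])

-- ===== VERDICT (by name: the statement is the Claim_ definition above) =====
theorem seed_expansion_spec : Claim_equal_seed_expansion := by
  intro hetero_graph seed_communities central_node_type adjacency_list _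
  unfold Spec_seed_expansion seed_expansion seed_expansion_alt
  rw [PySem.List.foldl_append_singleton_eq_map, PySem.List.foldl_append_singleton_eq_map]
  simp only [List.nil_append]
  refine congrArg (fun f => List.map f seed_communities) (funext fun seed => ?_)
  exact pvCommunity_eq central_node_type hetero_graph adjacency_list seed
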